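/-
  THE SEGMENTS OF THE READERS' FUNCTIONS (design/units.gif.tsv): the assertions at their cut points, the segment claims `Seg<k>`,
  and the COMPOSITIONS (segments ⇒ the function's contract), proved here.

  HOW A PROTECTED FUNCTION IS CUT (every function with an address-taken local has a protected frame: Gif/Frames.lean):
      f.P   THE PROLOGUE: entry … the instruction after the last inline shadow store. Exit assertion: `Start`
      f.k   THE BODY, cut after call returns / at loop heads: `Start` → … → `Done`; every cut in between has an assertion of its own
            (`Body` + what is live at THAT cut)
      f.E   THE EPILOGUE: the instruction that starts clearing the frame's shadow … `ret`. Entry assertion `Done`. Exit: `Returned`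
      f.COMPOSITION   proved below (`compose`)
  Every cut address is a label `Gif.L.<fn>.at_<hex>` (Gif/LabelsAt.lean, generated from design/cuts.gif.txt: the name IS the address).

  THE TEMPLATE IS `DGifGetWord` (37 instructions: 13 + 18 + 6). THE RULES, for every protected function (`RA` = the entry's `rsp`,
  the address of the return-address slot; `e` = the entry state; `v` = the state at the cut):

  R1  `Body cut` holds WHAT IS TRUE AT EVERY CUT between the prologue and the epilogue, ON EVERY PATH, and nothing else. It is what
      the epilogue needs and what every body segment hands on unchanged:
        entry, pre          the call that is being executed (`AtEntry … e`, the contract's precondition at `e`)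
        rip, rsp            `v.rip = cut`; the body's steady stack pointer `RA − raOff`
        the shadow index    the register that holds `(RA − raOff) >> 3`, IF the function keeps it in one callee-saved register over the
                            whole body (the epilogue's shadow stores go through it)
        r<k>                each callee-saved register that NO instruction of the function writes: `v.reg r = e.reg r`
        slot_<r>            each pushed register's slot, in push order: `v.mem.readLE (RA − 8 k) 8 = (e.reg r).toNat`
        slot_ra             the return-address slot: `UInt64.ofNat (v.mem.readLE RA 8) = ret` (the epilogue's `ret` reads it; stated
                            once, so that unit E does not dig it out of `same`)
        inv, ok             the heap's invariant with the function's OWN FRAME pushed and the clean stack ending at the body's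
                            `rsp`; the state invariant
        rem                 the reader did not go back: an INEQUALITY (an equality is false behind the first read)
        same                the footprint so far: the stack window, the frame's shadow span, then the contract's windows
        code, abi           the text is unchanged; DF = 0 and MXCSR's masks
      NOT in `Body`: an argument register (`rdi`, `rsi` …); a callee-saved register that holds an argument or a local and that SOME
      path overwrites (here `rbp` = gif: the success path computes the word in `ebp`); a fact about a local; `rax`. A register copy of
      an argument MAY be a field of `Body` only if NO instruction between the prologue and the epilogue writes that register (check
      the disassembly, every path), and it SHOULD be one only if a segment behind the first reads it (here `r12` = Word is never
      overwritten, but only the one body segment reads it: it is a field of `Start`).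
  R2  `Start` = `Body` at the first body cut + WHAT ONLY THE FIRST BODY SEGMENT MAY USE:
        the arguments       where they are behind the prologue: the callee-saved copies (`rbp = e.rdi`, `r12 = e.rsi`) AND every
                            argument register that the first segment reads before it writes it (`rdi`: InternalRead's first
                            argument is the entry's `rdi`, never reloaded)
        same0               the footprint of THE PROLOGUE ALONE: the stack window and the frame's shadow span. ONE field for "nothing
                            the contract speaks of has been touched yet": the reader is where it was (`Start.rem_eq`), every window
                            of the contract still holds the entry's bytes (`Start.word_eq`). The posts that count bytes from the
                            entry, or say "untouched", start from here
      A LATER CUT gets a structure of its own: `Body` + the registers / locals / exact measures that are live AT THAT CUT.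
  R3  `Done` = `Body` at the epilogue's first instruction + THE RESULTS ONLY: the result register and the clauses of the contract's
      postcondition, stated of the present memory and of `e` (the epilogue clears the frame's shadow and pops: neither changes what
      they read). `Done` inherits NO argument-register field and no local: the body may clobber every register it saved.
  R4  THE THREE CHECKS of an assertion, done on the disassembly: every field is TRUE at the cut on every path that reaches it;
      every field is ESTABLISHABLE from the assertion before it (a field of the exit about something the footprint `same` lists needs
      a field of the entry about it); every register and every slot that the NEXT segment reads before writing it is there.
-/
import Gif.Spec.Reader
import Gif.LabelsAt
namespace Gif.Spec
open X86 X86.User Asan ProgX.Base ProgX.Base.Spec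

/-! ### `DGifGetWord` (dgif_lib.c:740-751): P = 106020H … 106063H, 1 = 106063H … 10608CH, E = 10608CH … ret

  The prologue: three pushes (`r12 rbp rbx`), `sub rsp, 64`: `rsp = RA − 88`; `rbp = gif`, `r12 = Word`, `rbx` = the shadow index
  `(RA − 88) >> 3` (kept over the whole body: the epilogue stores through it); `r13 r14 r15` are never touched. The body reads `rdi`
  (still the entry's) for InternalRead, `rbp` on the failure path (`gif.Error`), `r12` on the success path (`*Word`), and computes
  the word in `ebp` on the success path. -/

namespace DGifGetWord

/-- The active frames inside the body: the function's own protected frame (`base = RA − 88`), innermost. -/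
abbrev framesIn (frames : List (Nat × FrameLayout)) (e : State) : List (Nat × FrameLayout) :=
  ((e.reg .rsp).toNat - 88, Gif.Frames.DGifGetWord) :: frames

/-- **IN THE BODY of `DGifGetWord`**, at the address `cut`, inside the call that was entered at the state `e` (return address `ret`)
with the function's precondition: what holds at EVERY cut between the prologue and the epilogue (rule R1). -/
structure Body (cut : Word) (H : Heap) (rest : List Obj) (frames : List (Nat × FrameLayout)) (F : Forest) (R : Rd) (u₀ e : State)
    (ret : Word) (v : State) : Prop where
  /-- the function was entered at `e` … -/
  entry : AtEntry (conv u₀) Gif.L.DGifGetWord.entry (DGifGetWord.spec H rest frames F R).frame ret e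
  /-- … with its precondition -/
  pre : (DGifGetWord.spec H rest frames F R).pre e
  rip : v.rip = cut
  /-- three pushes and `sub rsp, 64` -/
  rsp : v.reg .rsp = e.reg .rsp - 88
  /-- `mov rbx, rsp ; shr rbx, 3`: the shadow index of the frame; no instruction of the body writes `rbx` -/
  rbx : v.reg .rbx = (e.reg .rsp - 88) >>> 3
  /-- never touched -/
  r13 : v.reg .r13 = e.reg .r13
  r14 : v.reg .r14 = e.reg .r14
  r15 : v.reg .r15 = e.reg .r15
  /-- the saved registers, in push order (`r12 rbp rbx`) -/
  slot_r12 : v.mem.readLE (e.reg .rsp - 8) 8 = (e.reg .r12).toNat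
  slot_rbp : v.mem.readLE (e.reg .rsp - 16) 8 = (e.reg .rbp).toNat
  slot_rbx : v.mem.readLE (e.reg .rsp - 24) 8 = (e.reg .rbx).toNat
  /-- the return address is still in its slot -/
  slot_ra : UInt64.ofNat (v.mem.readLE (e.reg .rsp) 8) = ret
  /-- the heap's invariant, with the function's OWN frame pushed; the clean stack ends at the body's `rsp` -/
  inv : HeapInv H rest (framesIn frames e) ((e.reg .rsp).toNat - 88) v.mem
  /-- the state invariant -/
  ok : GifOK H F R v.mem
  /-- the reader did not go back -/
  rem : rem R v.mem ≤ rem R e.mem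
  /-- nothing was written but the function's stack, the 8 shadow bytes of its frame, and the contract's windows -/
  same : Mem.SameExcept
    [⟨(e.reg .rsp).toNat - 272, (e.reg .rsp).toNat⟩,
     shadowSpan ((e.reg .rsp).toNat - 88) ((e.reg .rsp).toNat - 24),
     ⟨(e.reg .rsi).toNat, (e.reg .rsi).toNat + 4⟩,
     ⟨F.gif + 96, F.gif + 100⟩,
     ⟨R.cur, R.cur + 8⟩] e.mem v.mem
  code : (conv u₀).code.In v.mem
  abi : (conv u₀).inv v

/-- **AFTER THE PROLOGUE** (at 106063H, `mov edx, 2`, l.744): `Body`, where the arguments are, and the prologue's own footprint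
(rule R2). -/
structure Start (H : Heap) (rest : List Obj) (frames : List (Nat × FrameLayout)) (F : Forest) (R : Rd) (u₀ e : State)
    (ret : Word) (v : State) : Prop where
  body : Body Gif.L.DGifGetWord.at_106063 H rest frames F R u₀ e ret v
  /-- `mov rbp, rdi`: gif -/
  rbp : v.reg .rbp = e.reg .rdi
  /-- `mov r12, rsi`: Word -/
  r12 : v.reg .r12 = e.reg .rsi
  /-- the prologue did not change `rdi`: it is InternalRead's first argument -/
  rdi : v.reg .rdi = e.reg .rdi
  /-- the prologue wrote the function's stack and the 8 shadow bytes of its frame, nothing else -/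
  same0 : Mem.SameExcept
    [⟨(e.reg .rsp).toNat - 272, (e.reg .rsp).toNat⟩,
     shadowSpan ((e.reg .rsp).toNat - 88) ((e.reg .rsp).toNat - 24)] e.mem v.mem

/-- **The reader is EXACTLY where it was at the entry** (the posts count the bytes consumed from the entry; `Body.rem`, an
inequality, would not give `rem + 2 = rem₀` after the read): the cursor is a stack object of a caller, above the return address. -/
theorem Start.rem_eq {H : Heap} {rest : List Obj} {frames : List (Nat × FrameLayout)} {F : Forest} {R : Rd} {u₀ e : State}
    {ret : Word} {v : State} (h : Start H rest frames F R u₀ e ret v) : rem R v.mem = rem R e.mem := by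
  have henv := h.body.pre.1
  have hcur := henv.ctx.cursor_range henv.heap.inv.shadow
  apply rem_sameExcept h.same0 (by omega)
  intro w hw
  simp only [List.mem_cons, List.mem_nil_iff, or_false] at hw
  rcases hw with rfl | rfl
  · left
    show (e.reg .rsp).toNat ≤ R.cur
    omega
  · right
    show R.cur + 16 ≤ 0xC00000 + ((e.reg .rsp).toNat - 88) / 8
    omega

/-- **`*Word` is still the entry's** (the post's clause "GIF_ERROR: `*Word` is untouched" starts from here): `Word` points into gif,
a heap object. -/
theorem Start.word_eq {H : Heap} {rest : List Obj} {frames : List (Nat × FrameLayout)} {F : Forest} {R : Rd} {u₀ e : State}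
    {ret : Word} {v : State} (h : Start H rest frames F R u₀ e ret v) :
    rd v.mem (e.reg .rsi).toNat 4 = rd e.mem (e.reg .rsi).toNat 4 := by
  obtain ⟨henv, _, hword⟩ := h.body.pre
  have hgin := henv.ok.owns.inside henv.heap.inv.heap (o := (F.gif, 120)) List.mem_cons_self
  have hbase := henv.heap.base
  have htop := h.body.entry.top
  simp only at hgin
  rw [hbase] at hgin
  apply h.same0.rd _ _ (by omega)
  intro w hw
  simp only [List.mem_cons, List.mem_nil_iff, or_false] at hw
  rcases hw with rfl | rfl
  · right
    show (e.reg .rsp).toNat ≤ (e.reg .rsi).toNat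
    have hhi : (e.reg .rsp).toNat + 8 ≤ 0x800000 := htop
    omega
  · left
    show (e.reg .rsi).toNat + 4 ≤ 0xC00000 + ((e.reg .rsp).toNat - 88) / 8
    omega

/-- **BEFORE THE EPILOGUE** (at 10608CH, the store that clears the frame's shadow): `Body`, the result in `eax`, and the
contract's postcondition stated of the present memory (rule R3). NO register but `rax`: the success path leaves the word in `ebp`. -/
structure Done (H : Heap) (rest : List Obj) (frames : List (Nat × FrameLayout)) (F : Forest) (R : Rd) (u₀ e : State)
    (ret : Word) (v : State) : Prop where
  body : Body Gif.L.DGifGetWord.at_10608c H rest frames F R u₀ e ret v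
  /-- GIF_OK (1) or GIF_ERROR (0) -/
  res : IsBool v
  /-- GIF_OK: `*Word` is a 16-bit value, and exactly two bytes were consumed -/
  ok1 : (v.reg .rax).toNat = 1 → rd v.mem (e.reg .rsi).toNat 4 ≤ 65535 ∧ rem R v.mem + 2 = rem R e.mem
  /-- GIF_ERROR: `*Word` is untouched -/
  ok0 : (v.reg .rax).toNat = 0 → rd v.mem (e.reg .rsi).toNat 4 = rd e.mem (e.reg .rsi).toNat 4

/-- **Segment P** (the prologue, 13 instructions): three pushes, `sub rsp, 64`, the two argument moves, the frame's three header
words, the shadow index, the two poison stores. -/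
def SegP (Lay : Layout) (μ : Microarch) (u₀ : State) : Prop :=
  ∀ (H : Heap) (rest : List Obj) (frames : List (Nat × FrameLayout)) (F : Forest) (R : Rd) (e : State) (ret : Word),
    AtEntry (conv u₀) Gif.L.DGifGetWord.entry (DGifGetWord.spec H rest frames F R).frame ret e →
    (DGifGetWord.spec H rest frames F R).pre e →
    ReachVia Lay μ WayInv e (Start H rest frames F R u₀ e ret)

/-- **Segment 1** (the body, 18 instructions): `InternalRead(gif, c, 2)` into the frame's object `c`; 2 bytes: the checked store of
`*Word`, `eax = 1`; fewer: the checked store of `gif.Error`, `eax = 0`. -/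
def Seg1 (Lay : Layout) (μ : Microarch) (u₀ : State) : Prop :=
  ∀ (H : Heap) (rest : List Obj) (frames : List (Nat × FrameLayout)) (F : Forest) (R : Rd) (e : State) (ret : Word) (v : State),
    Start H rest frames F R u₀ e ret v →
    ReachVia Lay μ WayInv v (Done H rest frames F R u₀ e ret)

/-- **Segment E** (the epilogue, 6 instructions): the 8-byte store that clears the frame's shadow, `add rsp, 64`, three pops, `ret`. -/
def SegE (Lay : Layout) (μ : Microarch) (u₀ : State) : Prop :=
  ∀ (H : Heap) (rest : List Obj) (frames : List (Nat × FrameLayout)) (F : Forest) (R : Rd) (e : State) (ret : Word) (v : State),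
    Done H rest frames F R u₀ e ret v →
    ReachVia Lay μ WayInv v (Returned (conv u₀) (DGifGetWord.spec H rest frames F R) e ret)

/-- **The composition of `DGifGetWord`**: the three segments chain into the function's contract. -/
theorem compose {Lay : Layout} {μ : Microarch} {u₀ : State} (hP : SegP Lay μ u₀) (h1 : Seg1 Lay μ u₀) (hE : SegE Lay μ u₀) :
    ∀ (H : Heap) (rest : List Obj) (frames : List (Nat × FrameLayout)) (F : Forest) (R : Rd),
      Calls Lay μ WayInv (conv u₀) Gif.L.DGifGetWord.entry (DGifGetWord.spec H rest frames F R) := by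
  intro H rest frames F R e ret he hp
  refine (hP H rest frames F R e ret he hp).trans ?_
  intro v hv
  refine (h1 H rest frames F R e ret v hv).trans ?_
  intro w hw
  exact hE H rest frames F R e ret w hw

end DGifGetWord

end Gif.Spec
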